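-- pv_equiv track=rewrite | github.com/dgymjol/TR-DETR | aug_cut.py | find_ones_groups
-- ===== SOURCE A (Python) =====
-- def find_ones_groups(arr):
--     groups = []
--     start_idx = None
--
--     l = len(arr)
--     for i in range(l):
--         if arr[i] == 1 and start_idx is None:
--             # 1이 처음 시작되는 인덱스 기록
--             start_idx = i
--         elif arr[i] == 0 and start_idx is not None:
--             # 1의 그룹이 끝나는 인덱스 기록
--             groups.append([start_idx * 2, i * 2])
--             start_idx = None
--
--     # 마지막 그룹이 배열 끝까지 이어지는 경우 처리
--     if start_idx is not None:
--         groups.append([start_idx * 2, len(arr) * 2])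
--
--     return groups
-- ===== SOURCE B (Python) =====
-- def find_ones_groups(arr):
--     # pass 1: forward-filled state list (non-0/1 values carry the previous state)
--     states = []
--     state = False
--     for x in arr:
--         if x == 1:
--             state = True
--         elif x == 0:
--             state = False
--         states.append(state)
--     # pass 2: edge detection on the state sequence
--     groups = []
--     prev = False
--     start = 0
--     for i, cur in enumerate(states):
--         if cur and not prev:
--             start = i
--         elif prev and not cur:
--             groups.append([start * 2, i * 2])
--         prev = cur
--     if prev:
--         groups.append([start * 2, len(arr) * 2])
--     return groups
-- ===== Notes on version B (the rewrite author's own statement) =====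
-- stated objective: alternative
-- what changed: B splits the work into two differently-shaped passes: first it forward-fills a boolean state list (1 sets, 0 clears, other values carry), then it detects False->True/True->False edges in that state sequence to emit the scaled group boundaries, instead of A's single loop threading an Optional start index.
import Mathlib
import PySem

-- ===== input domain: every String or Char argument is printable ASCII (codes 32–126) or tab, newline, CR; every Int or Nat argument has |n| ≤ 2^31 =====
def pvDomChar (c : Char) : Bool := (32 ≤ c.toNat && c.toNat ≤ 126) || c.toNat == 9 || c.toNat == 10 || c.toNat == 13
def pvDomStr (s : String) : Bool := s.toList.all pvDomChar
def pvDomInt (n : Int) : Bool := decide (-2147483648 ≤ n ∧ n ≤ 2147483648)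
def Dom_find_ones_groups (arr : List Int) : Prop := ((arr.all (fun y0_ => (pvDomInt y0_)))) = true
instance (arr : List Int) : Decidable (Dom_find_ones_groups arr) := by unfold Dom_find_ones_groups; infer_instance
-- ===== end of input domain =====

-- B replaces A's single loop over an Optional start index by two passes: a
-- forward-filled boolean state list, then edge detection on that sequence
-- (alternative decomposition, same O(n) cost; return value only, no mutation).

-- ===== PORT A =====
-- A's for-loop over indices, as structural recursion carrying the index i,
-- the Optional start index and the accumulated groups (branches in A's order).
def aGo (xs : List Int) (i : Int) (start : Option Int) (groups : List (List Int)) :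
    List (List Int) × Option Int :=
  match xs, start with
  | [], st => (groups, st)
  | x :: rest, none =>
      if x = 1 then aGo rest (i + 1) (some i) groups
      else aGo rest (i + 1) none groups
  | x :: rest, some s =>
      if x = 0 then aGo rest (i + 1) none (groups ++ [[s * 2, i * 2]])
      else aGo rest (i + 1) (some s) groups

def find_ones_groups (arr : List Int) : List (List Int) :=
  match aGo arr 0 none [] with
  | (groups, some s) => groups ++ [[s * 2, (arr.length : Int) * 2]]
  | (groups, none) => groups

-- ===== PORT B =====
-- pass 1: forward-filled state list (1 sets, 0 clears, other values carry)
def bFill (xs : List Int) (state : Bool) : List Bool :=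
  match xs with
  | [] => []
  | x :: rest =>
      let st := if x = 1 then true else if x = 0 then false else state
      st :: bFill rest st

-- pass 2: edge detection on the state sequence
def bEdges (ss : List Bool) (i : Int) (prev : Bool) (start : Int)
    (groups : List (List Int)) : List (List Int) × Bool × Int :=
  match ss with
  | [] => (groups, prev, start)
  | cur :: rest =>
      if cur && !prev then bEdges rest (i + 1) cur i groups
      else if prev && !cur then bEdges rest (i + 1) cur start (groups ++ [[start * 2, i * 2]])
      else bEdges rest (i + 1) cur start groups

def find_ones_groups_alt (arr : List Int) : List (List Int) :=
  match bEdges (bFill arr false) 0 false 0 [] with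
  | (groups, prev, start) =>
      if prev then groups ++ [[start * 2, (arr.length : Int) * 2]] else groups

-- ===== PRECONDITION & SPEC =====
def Spec_find_ones_groups (arr : List Int) (out : List (List Int)) : Prop := out = find_ones_groups_alt arr
instance (arr : List Int) (out : List (List Int)) : Decidable (Spec_find_ones_groups arr out) := by unfold Spec_find_ones_groups; infer_instance

-- ===== CLAIM (what is proved, stated in full; the proofs are below) =====
def Claim_equal_find_ones_groups : Prop := ∀ (arr : List Int), Dom_find_ones_groups arr → Spec_find_ones_groups arr (find_ones_groups arr)

-- ===== LEMMAS AND PROOFS =====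

-- finishing step of each port, as a function of the loop result
def finishA (p : List (List Int) × Option Int) (n : Int) : List (List Int) :=
  match p with
  | (g, some s) => g ++ [[s * 2, n * 2]]
  | (g, none) => g

def finishB (t : List (List Int) × Bool × Int) (n : Int) : List (List Int) :=
  match t with
  | (g, prev, start) => if prev then g ++ [[start * 2, n * 2]] else g

-- the loops agree: A's Optional start corresponds to B's (prev, start) pair
lemma key (xs : List Int) : ∀ (i n : Int) (groups : List (List Int))
    (st : Option Int) (start : Int), (st = none ∨ st = some start) →
    finishA (aGo xs i st groups) n =
      finishB (bEdges (bFill xs st.isSome) i st.isSome start groups) n := by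
  induction xs with
  | nil =>
      intro i n groups st start h
      rcases h with h | h <;> subst h <;> simp [aGo, bFill, bEdges, finishA, finishB]
  | cons x rest ih =>
      intro i n groups st start h
      rcases h with h | h <;> subst h
      · by_cases h1 : x = 1
        · simpa [aGo, bFill, bEdges, h1] using ih (i + 1) n groups (some i) i (Or.inr rfl)
        · by_cases h0 : x = 0 <;>
            simpa [aGo, bFill, bEdges, h1, h0] using ih (i + 1) n groups none start (Or.inl rfl)
      · by_cases h0 : x = 0
        · simpa [aGo, bFill, bEdges, h0] using
            ih (i + 1) n (groups ++ [[start * 2, i * 2]]) none start (Or.inl rfl)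
        · by_cases h1 : x = 1 <;>
            simpa [aGo, bFill, bEdges, h1, h0] using
              ih (i + 1) n groups (some start) start (Or.inr rfl)

lemma a_finish (arr : List Int) :
    find_ones_groups arr = finishA (aGo arr 0 none []) (arr.length : Int) := by
  rcases h : aGo arr 0 none [] with ⟨g, st⟩
  cases st <;> simp [find_ones_groups, finishA, h]

lemma b_finish (arr : List Int) :
    find_ones_groups_alt arr = finishB (bEdges (bFill arr false) 0 false 0 []) (arr.length : Int) := by
  rcases h : bEdges (bFill arr false) 0 false 0 [] with ⟨g, prev, start⟩
  simp [find_ones_groups_alt, finishB, h]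

-- ===== VERDICT (by name: the statement is the Claim_ definition above) =====
theorem find_ones_groups_spec : Claim_equal_find_ones_groups := by
  intro arr _
  show find_ones_groups arr = find_ones_groups_alt arr
  rw [a_finish, b_finish]
  exact key arr 0 (arr.length : Int) [] none 0 (Or.inl rfl)
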